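-- pv_equiv track=rewrite | github.com/chinhtv9820/CaroOnline | ai_engine/main.py | get_nearby_cells
-- ===== SOURCE A (Python) =====
-- EMPTY = 0
--
-- def get_nearby_cells(board, dist=2):
--     """Tìm các ô trống xung quanh quân đã đánh"""
--     rows = len(board)
--     cols = len(board[0])
--     candidates = set()
--
--     for r in range(rows):
--         for c in range(cols):
--             if board[r][c] != EMPTY:
--                 for dr in range(-dist, dist+1):
--                     for dc in range(-dist, dist+1):
--                         if dr == 0 and dc == 0: continue
--                         nr, nc = r + dr, c + dc
--                         if 0 <= nr < rows and 0 <= nc < cols and board[nr][nc] == EMPTY: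
--                             candidates.add((nr, nc))
--     return list(candidates)
-- ===== SOURCE B (Python) =====
-- EMPTY = 0
--
-- def get_nearby_cells(board, dist=2):
--     """Empty-cell-driven: keep each empty cell that has an occupied cell in its
--     (Chebyshev-)dist neighborhood; row-major order, no set needed."""
--     rows = len(board)
--     cols = len(board[0])
--
--     def has_occupied_neighbor(r, c):
--         for dr in range(-dist, dist + 1):
--             for dc in range(-dist, dist + 1):
--                 if dr == 0 and dc == 0:
--                     continue
--                 nr, nc = r + dr, c + dc
--                 if 0 <= nr < rows and 0 <= nc < cols and board[nr][nc] != EMPTY: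
--                     return True
--         return False
--
--     out = []
--     for r in range(rows):
--         for c in range(cols):
--             if board[r][c] == EMPTY and has_occupied_neighbor(r, c):
--                 out.append((r, c))
--     return out
-- ===== Notes on version B (the rewrite author's own statement) =====
-- stated objective: alternative
-- what changed: B pivots from A's occupied-cell-driven marking (each occupied cell stamps its whole (2*dist+1)^2 box of empty neighbours into a set) to empty-cell-driven detection (each empty cell is kept iff an early-exit scan finds an occupied cell in its Chebyshev-dist box), needing no set and emitting cells in deterministic row-major order; the early exit made B measurably faster on a timing run's boards.
import Mathlib
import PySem

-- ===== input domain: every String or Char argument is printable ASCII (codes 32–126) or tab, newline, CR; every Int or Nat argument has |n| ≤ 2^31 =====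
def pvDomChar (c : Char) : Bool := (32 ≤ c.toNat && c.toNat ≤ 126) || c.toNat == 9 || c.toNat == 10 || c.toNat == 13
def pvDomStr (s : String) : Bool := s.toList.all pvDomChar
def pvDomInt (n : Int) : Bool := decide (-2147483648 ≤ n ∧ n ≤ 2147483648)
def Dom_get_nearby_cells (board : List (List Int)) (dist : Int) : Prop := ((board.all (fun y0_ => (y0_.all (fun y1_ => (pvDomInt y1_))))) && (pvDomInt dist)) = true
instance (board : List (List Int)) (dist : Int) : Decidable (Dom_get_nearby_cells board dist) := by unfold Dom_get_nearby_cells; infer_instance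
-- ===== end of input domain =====

-- B re-decomposes the scan from occupied-driven set-marking to empty-cell-driven detection with
-- an early-exit neighbourhood probe (measurably faster on a timing run's inputs; same worst
-- case), emitting the same set of cells in deterministic row-major order.

-- ===== PORT A =====
/-- Port of A.  `list(candidates)`: Python's set iteration order is hash-based and is not
modelled (the result is compared as a set); the set's elements are returned in canonical
ascending (row, col) order. -/
def get_nearby_cells (board : List (List Int)) (dist : Int) : List (Int × Int) :=
  let rows : Int := PySem.List.len board
  -- board[0]; Pre_ excludes the empty board (IndexError)
  let cols : Int := PySem.List.len (PySem.List.pyGetD board 0 [])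
  let candidates : PySem.Set (Int × Int) :=
    List.foldl (fun s r =>
      List.foldl (fun s c =>
        if PySem.List.pyGetD (PySem.List.pyGetD board r []) c 0 ≠ 0 then
          List.foldl (fun s dr =>
            List.foldl (fun s dc =>
              if dr = 0 ∧ dc = 0 then s
              else  -- nr = r + dr, nc = c + dc inlined
                if 0 ≤ r + dr ∧ r + dr < rows ∧ 0 ≤ c + dc ∧ c + dc < cols ∧
                    PySem.List.pyGetD (PySem.List.pyGetD board (r + dr) []) (c + dc) 0 = 0 then
                  PySem.Set.add s (r + dr, c + dc)
                else s) s (PySem.List.pyRange (-dist) (dist + 1) 1)) s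
            (PySem.List.pyRange (-dist) (dist + 1) 1)
        else s) s (PySem.List.pyRange 0 cols 1)) PySem.Set.empty (PySem.List.pyRange 0 rows 1)
  PySem.List.sorted candidates (fun p => (toLex p : Lex (Int × Int)))

-- ===== PORT B =====
/-- B-side helper `has_occupied_neighbor` (early `return True` = `List.any`). -/
def pvNearB (board : List (List Int)) (rows cols dist r c : Int) : Bool :=
  List.any (PySem.List.pyRange (-dist) (dist + 1) 1) (fun dr =>
    List.any (PySem.List.pyRange (-dist) (dist + 1) 1) (fun dc =>
      !(dr == 0 && dc == 0) &&
      (decide (0 ≤ r + dr) && decide (r + dr < rows) &&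
       decide (0 ≤ c + dc) && decide (c + dc < cols)) &&
      (PySem.List.pyGetD (PySem.List.pyGetD board (r + dr) []) (c + dc) 0 != 0)))

def get_nearby_cells_alt (board : List (List Int)) (dist : Int) : List (Int × Int) :=
  let rows : Int := PySem.List.len board
  let cols : Int := PySem.List.len (PySem.List.pyGetD board 0 [])
  List.foldl (fun out r =>
    List.foldl (fun out c =>
      if PySem.List.pyGetD (PySem.List.pyGetD board r []) c 0 = 0 ∧
          pvNearB board rows cols dist r c then
        out ++ [(r, c)]
      else out) out (PySem.List.pyRange 0 cols 1)) [] (PySem.List.pyRange 0 rows 1)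

-- ===== PRECONDITION & SPEC =====
-- Pre_ excludes exactly the inputs where Python A raises IndexError: the empty board
-- (board[0]) and boards in which some row is shorter than the first row (board[r][c]
-- is read for every c < len(board[0])).  No input on which A returns is excluded.
def Pre_get_nearby_cells (board : List (List Int)) (dist : Int) : Prop :=
  board ≠ [] ∧ ∀ row ∈ board, (board.headD []).length ≤ row.length
instance (board : List (List Int)) (dist : Int) : Decidable (Pre_get_nearby_cells board dist) := by
  unfold Pre_get_nearby_cells; infer_instance

def pvWitness_get_nearby_cells : List (List Int) × Int := ([[1, 0], [0, 0]], 1)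

def Spec_get_nearby_cells (board : List (List Int)) (dist : Int) (out : List (Int × Int)) : Prop := out = get_nearby_cells_alt board dist
instance (board : List (List Int)) (dist : Int) (out : List (Int × Int)) : Decidable (Spec_get_nearby_cells board dist out) := by unfold Spec_get_nearby_cells; infer_instance

-- ===== CLAIM (what is proved, stated in full; the proofs are below) =====
def Claim_equal_get_nearby_cells : Prop := ∀ (board : List (List Int)) (dist : Int), Dom_get_nearby_cells board dist → Pre_get_nearby_cells board dist → Spec_get_nearby_cells board dist (get_nearby_cells board dist)

-- ===== LEMMAS AND PROOFS =====

/-- Membership in a fold whose step either keeps the set or adds elements described by `Q`. -/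
lemma pv_mem_foldl_iff {α β : Type} [BEq β] (g : PySem.Set β → α → PySem.Set β)
    (Q : α → β → Prop) (h : ∀ (s : PySem.Set β) (x : α) (y : β), y ∈ g s x ↔ y ∈ s ∨ Q x y) :
    ∀ (l : List α) (s : PySem.Set β) (y : β),
      y ∈ List.foldl g s l ↔ y ∈ s ∨ ∃ x ∈ l, Q x y := by
  intro l
  induction l with
  | nil => simp
  | cons a t ih =>
    intro s y
    simp only [List.foldl_cons, ih, h, List.mem_cons]
    aesop

lemma pv_nodup_foldl {α β : Type} (g : PySem.Set β → α → PySem.Set β)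
    (h : ∀ (s : PySem.Set β) (x : α), s.Nodup → (g s x).Nodup) :
    ∀ (l : List α) (s : PySem.Set β), s.Nodup → (List.foldl g s l).Nodup := by
  intro l
  induction l with
  | nil => intro s hs; simpa using hs
  | cons a t ih => intro s hs; simpa [List.foldl_cons] using ih _ (h s a hs)

lemma pv_h4 (board : List (List Int)) (rows cols r c dr : Int) :
    ∀ (s : PySem.Set (Int × Int)) (dc : Int) (y : Int × Int),
      y ∈ (if dr = 0 ∧ dc = 0 then s
           else
             if 0 ≤ r + dr ∧ r + dr < rows ∧ 0 ≤ c + dc ∧ c + dc < cols ∧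
                 PySem.List.pyGetD (PySem.List.pyGetD board (r + dr) []) (c + dc) 0 = 0 then
               PySem.Set.add s (r + dr, c + dc)
             else s)
      ↔ y ∈ s ∨ (¬(dr = 0 ∧ dc = 0) ∧
          (0 ≤ r + dr ∧ r + dr < rows ∧ 0 ≤ c + dc ∧ c + dc < cols ∧
            PySem.List.pyGetD (PySem.List.pyGetD board (r + dr) []) (c + dc) 0 = 0) ∧
          y = (r + dr, c + dc)) := by
  intro s dc y
  split_ifs with h1 h2
  · simp [h1]
  · simp [PySem.Set.mem_add, h1, h2]
  · simp [h1, h2]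

lemma pv_mem_dcloop (board : List (List Int)) (rows cols dist r c dr : Int)
    (s : PySem.Set (Int × Int)) (y : Int × Int) :
    y ∈ List.foldl (fun s dc =>
          if dr = 0 ∧ dc = 0 then s
          else
            if 0 ≤ r + dr ∧ r + dr < rows ∧ 0 ≤ c + dc ∧ c + dc < cols ∧
                PySem.List.pyGetD (PySem.List.pyGetD board (r + dr) []) (c + dc) 0 = 0 then
              PySem.Set.add s (r + dr, c + dc)
            else s) s (PySem.List.pyRange (-dist) (dist + 1) 1)
    ↔ y ∈ s ∨ ∃ dc, (-dist ≤ dc ∧ dc < dist + 1) ∧ (¬(dr = 0 ∧ dc = 0) ∧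
        (0 ≤ r + dr ∧ r + dr < rows ∧ 0 ≤ c + dc ∧ c + dc < cols ∧
          PySem.List.pyGetD (PySem.List.pyGetD board (r + dr) []) (c + dc) 0 = 0) ∧
        y = (r + dr, c + dc)) := by
  rw [pv_mem_foldl_iff _ _ (pv_h4 board rows cols r c dr)]
  simp only [PySem.List.mem_pyRange_one]

lemma pv_mem_drloop (board : List (List Int)) (rows cols dist r c : Int)
    (s : PySem.Set (Int × Int)) (y : Int × Int) :
    y ∈ List.foldl (fun s dr =>
          List.foldl (fun s dc =>
            if dr = 0 ∧ dc = 0 then s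
            else
              if 0 ≤ r + dr ∧ r + dr < rows ∧ 0 ≤ c + dc ∧ c + dc < cols ∧
                  PySem.List.pyGetD (PySem.List.pyGetD board (r + dr) []) (c + dc) 0 = 0 then
                PySem.Set.add s (r + dr, c + dc)
              else s) s (PySem.List.pyRange (-dist) (dist + 1) 1)) s
          (PySem.List.pyRange (-dist) (dist + 1) 1)
    ↔ y ∈ s ∨ ∃ dr, (-dist ≤ dr ∧ dr < dist + 1) ∧
        ∃ dc, (-dist ≤ dc ∧ dc < dist + 1) ∧ (¬(dr = 0 ∧ dc = 0) ∧
          (0 ≤ r + dr ∧ r + dr < rows ∧ 0 ≤ c + dc ∧ c + dc < cols ∧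
            PySem.List.pyGetD (PySem.List.pyGetD board (r + dr) []) (c + dc) 0 = 0) ∧
          y = (r + dr, c + dc)) := by
  rw [pv_mem_foldl_iff _ _ (fun s dr y => pv_mem_dcloop board rows cols dist r c dr s y)]
  simp only [PySem.List.mem_pyRange_one]

lemma pv_h2 (board : List (List Int)) (rows cols dist r : Int) :
    ∀ (s : PySem.Set (Int × Int)) (c : Int) (y : Int × Int),
      y ∈ (if PySem.List.pyGetD (PySem.List.pyGetD board r []) c 0 ≠ 0 then
             List.foldl (fun s dr =>
               List.foldl (fun s dc =>
                 if dr = 0 ∧ dc = 0 then s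
                 else
                   if 0 ≤ r + dr ∧ r + dr < rows ∧ 0 ≤ c + dc ∧ c + dc < cols ∧
                       PySem.List.pyGetD (PySem.List.pyGetD board (r + dr) []) (c + dc) 0 = 0 then
                     PySem.Set.add s (r + dr, c + dc)
                   else s) s (PySem.List.pyRange (-dist) (dist + 1) 1)) s
               (PySem.List.pyRange (-dist) (dist + 1) 1)
           else s)
      ↔ y ∈ s ∨ (PySem.List.pyGetD (PySem.List.pyGetD board r []) c 0 ≠ 0 ∧
          ∃ dr, (-dist ≤ dr ∧ dr < dist + 1) ∧
            ∃ dc, (-dist ≤ dc ∧ dc < dist + 1) ∧ (¬(dr = 0 ∧ dc = 0) ∧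
              (0 ≤ r + dr ∧ r + dr < rows ∧ 0 ≤ c + dc ∧ c + dc < cols ∧
                PySem.List.pyGetD (PySem.List.pyGetD board (r + dr) []) (c + dc) 0 = 0) ∧
              y = (r + dr, c + dc))) := by
  intro s c y
  split_ifs with h1
  · rw [pv_mem_drloop board rows cols dist r c]; simp [h1]
  · simp [h1]

lemma pv_mem_cloop (board : List (List Int)) (rows cols dist r : Int)
    (s : PySem.Set (Int × Int)) (y : Int × Int) :
    y ∈ List.foldl (fun s c =>
          if PySem.List.pyGetD (PySem.List.pyGetD board r []) c 0 ≠ 0 then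
            List.foldl (fun s dr =>
              List.foldl (fun s dc =>
                if dr = 0 ∧ dc = 0 then s
                else
                  if 0 ≤ r + dr ∧ r + dr < rows ∧ 0 ≤ c + dc ∧ c + dc < cols ∧
                      PySem.List.pyGetD (PySem.List.pyGetD board (r + dr) []) (c + dc) 0 = 0 then
                    PySem.Set.add s (r + dr, c + dc)
                  else s) s (PySem.List.pyRange (-dist) (dist + 1) 1)) s
              (PySem.List.pyRange (-dist) (dist + 1) 1)
          else s) s (PySem.List.pyRange 0 cols 1)
    ↔ y ∈ s ∨ ∃ c, (0 ≤ c ∧ c < cols) ∧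
        (PySem.List.pyGetD (PySem.List.pyGetD board r []) c 0 ≠ 0 ∧
          ∃ dr, (-dist ≤ dr ∧ dr < dist + 1) ∧
            ∃ dc, (-dist ≤ dc ∧ dc < dist + 1) ∧ (¬(dr = 0 ∧ dc = 0) ∧
              (0 ≤ r + dr ∧ r + dr < rows ∧ 0 ≤ c + dc ∧ c + dc < cols ∧
                PySem.List.pyGetD (PySem.List.pyGetD board (r + dr) []) (c + dc) 0 = 0) ∧
              y = (r + dr, c + dc))) := by
  rw [pv_mem_foldl_iff _ _ (pv_h2 board rows cols dist r)]
  simp only [PySem.List.mem_pyRange_one]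

/-- The predicate the occupied-driven set construction realises. -/
def pvP (board : List (List Int)) (dist : Int) (y : Int × Int) : Prop :=
  ∃ r, (0 ≤ r ∧ r < PySem.List.len board) ∧
    ∃ c, (0 ≤ c ∧ c < PySem.List.len (PySem.List.pyGetD board 0 [])) ∧
      (PySem.List.pyGetD (PySem.List.pyGetD board r []) c 0 ≠ 0 ∧
        ∃ dr, (-dist ≤ dr ∧ dr < dist + 1) ∧
          ∃ dc, (-dist ≤ dc ∧ dc < dist + 1) ∧ (¬(dr = 0 ∧ dc = 0) ∧
            (0 ≤ r + dr ∧ r + dr < PySem.List.len board ∧ 0 ≤ c + dc ∧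
              c + dc < PySem.List.len (PySem.List.pyGetD board 0 []) ∧
              PySem.List.pyGetD (PySem.List.pyGetD board (r + dr) []) (c + dc) 0 = 0) ∧
            y = (r + dr, c + dc)))

/-- The predicate the empty-cell-driven filter realises. -/
def pvQ (board : List (List Int)) (dist : Int) (y : Int × Int) : Prop :=
  ∃ r, (0 ≤ r ∧ r < PySem.List.len board) ∧
    ∃ c, (0 ≤ c ∧ c < PySem.List.len (PySem.List.pyGetD board 0 [])) ∧
      (PySem.List.pyGetD (PySem.List.pyGetD board r []) c 0 = 0 ∧
        ∃ dr, (-dist ≤ dr ∧ dr < dist + 1) ∧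
          ∃ dc, (-dist ≤ dc ∧ dc < dist + 1) ∧ (¬(dr = 0 ∧ dc = 0) ∧
            (0 ≤ r + dr ∧ r + dr < PySem.List.len board ∧ 0 ≤ c + dc ∧
              c + dc < PySem.List.len (PySem.List.pyGetD board 0 [])) ∧
            PySem.List.pyGetD (PySem.List.pyGetD board (r + dr) []) (c + dc) 0 ≠ 0)) ∧
      y = (r, c)

lemma pv_P_iff_Q (board : List (List Int)) (dist : Int) (y : Int × Int) :
    pvP board dist y ↔ pvQ board dist y := by
  unfold pvP pvQ
  constructor
  · rintro ⟨r, hr, c, hc, hocc, dr, hdr, dc, hdc, hno, ⟨b1, b2, b3, b4, hemp⟩, rfl⟩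
    refine ⟨r + dr, ⟨b1, b2⟩, c + dc, ⟨b3, b4⟩, ⟨hemp, -dr, by omega, -dc, by omega,
      by omega, by constructor <;> omega, ?_⟩, rfl⟩
    have e1 : r + dr + -dr = r := by ring
    have e2 : c + dc + -dc = c := by ring
    rw [e1, e2]; exact hocc
  · rintro ⟨r, hr, c, hc, ⟨hemp, dr, hdr, dc, hdc, hno, ⟨b1, b2, b3, b4⟩, hocc⟩, rfl⟩
    refine ⟨r + dr, ⟨b1, b2⟩, c + dc, ⟨b3, b4⟩, hocc, -dr, by omega, -dc, by omega,
      by omega, ?_, ?_⟩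
    · have e1 : r + dr + -dr = r := by ring
      have e2 : c + dc + -dc = c := by ring
      rw [e1, e2]
      exact ⟨hr.1, hr.2, hc.1, hc.2, hemp⟩
    · have e1 : r + dr + -dr = r := by ring
      have e2 : c + dc + -dc = c := by ring
      rw [e1, e2]

lemma pv_nearB_iff (board : List (List Int)) (rows cols dist r c : Int) :
    pvNearB board rows cols dist r c = true ↔
      ∃ dr, (-dist ≤ dr ∧ dr < dist + 1) ∧
        ∃ dc, (-dist ≤ dc ∧ dc < dist + 1) ∧ (¬(dr = 0 ∧ dc = 0) ∧
          (0 ≤ r + dr ∧ r + dr < rows ∧ 0 ≤ c + dc ∧ c + dc < cols) ∧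
          PySem.List.pyGetD (PySem.List.pyGetD board (r + dr) []) (c + dc) 0 ≠ 0) := by
  simp only [pvNearB, List.any_eq_true, PySem.List.mem_pyRange_one, Bool.and_eq_true,
    Bool.not_eq_true', Bool.and_eq_false_iff, beq_eq_false_iff_ne, ne_eq, decide_eq_true_eq,
    bne_iff_ne]
  constructor <;>
    (rintro ⟨dr, hdr, dc, hdc, h⟩; refine ⟨dr, hdr, dc, hdc, ?_⟩; tauto)

/-- B's result, rewritten as a flatMap of filtered row segments. -/
lemma pv_alt_eq (board : List (List Int)) (dist : Int) :
    get_nearby_cells_alt board dist =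
      List.flatMap (fun r =>
        List.map (fun c => (r, c))
          (List.filter (fun c =>
            decide (PySem.List.pyGetD (PySem.List.pyGetD board r []) c 0 = 0 ∧
              pvNearB board (PySem.List.len board)
                (PySem.List.len (PySem.List.pyGetD board 0 [])) dist r c = true))
            (PySem.List.pyRange 0 (PySem.List.len (PySem.List.pyGetD board 0 [])) 1)))
        (PySem.List.pyRange 0 (PySem.List.len board) 1) := by
  show List.foldl _ _ _ = _
  rw [PySem.List.foldl_congr_mem _ _
      (fun out r => out ++
        List.map (fun c => (r, c))
          (List.filter (fun c =>
            decide (PySem.List.pyGetD (PySem.List.pyGetD board r []) c 0 = 0 ∧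
              pvNearB board (PySem.List.len board)
                (PySem.List.len (PySem.List.pyGetD board 0 [])) dist r c = true))
            (PySem.List.pyRange 0 (PySem.List.len (PySem.List.pyGetD board 0 [])) 1))) _
      (by intro acc r _; exact PySem.List.foldl_append_ite _ (fun c => (r, c)) _ _)]
  rw [PySem.List.foldl_append_eq_flatMap]
  simp

lemma pv_mem_alt (board : List (List Int)) (dist : Int) (y : Int × Int) :
    y ∈ get_nearby_cells_alt board dist ↔ pvQ board dist y := by
  rw [pv_alt_eq]
  simp only [List.mem_flatMap, List.mem_map, List.mem_filter, PySem.List.mem_pyRange_one,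
    decide_eq_true_eq, pvQ, pv_nearB_iff]
  constructor
  · rintro ⟨r, hr, c, ⟨hc, hcond⟩, rfl⟩
    exact ⟨r, hr, c, hc, hcond, rfl⟩
  · rintro ⟨r, hr, c, hc, hcond, rfl⟩
    exact ⟨r, hr, c, ⟨hc, hcond⟩, rfl⟩

lemma pv_pairwise_alt (board : List (List Int)) (dist : Int) :
    List.Pairwise (fun a b => (toLex a : Lex (Int × Int)) < toLex b)
      (get_nearby_cells_alt board dist) := by
  rw [pv_alt_eq, List.pairwise_flatMap]
  constructor
  · intro r _
    rw [List.pairwise_map]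
    apply List.Pairwise.filter
    apply (PySem.List.pairwise_lt_pyRange_one 0 _).imp
    intro a b hab
    rw [Prod.Lex.toLex_lt_toLex]
    exact Or.inr ⟨rfl, hab⟩
  · apply (PySem.List.pairwise_lt_pyRange_one 0 _).imp
    intro a b hab x hx y hy
    simp only [List.mem_map, List.mem_filter] at hx hy
    obtain ⟨c1, _, rfl⟩ := hx
    obtain ⟨c2, _, rfl⟩ := hy
    rw [Prod.Lex.toLex_lt_toLex]
    exact Or.inl hab

lemma pv_nodup_alt (board : List (List Int)) (dist : Int) :
    (get_nearby_cells_alt board dist).Nodup :=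
  (pv_pairwise_alt board dist).imp (fun {a b} hlt he => by subst he; exact lt_irrefl _ hlt)

-- ===== VERDICT (by name: the statement is the Claim_ definition above) =====
theorem get_nearby_cells_spec : Claim_equal_get_nearby_cells := by
  intro board dist _ _
  unfold Spec_get_nearby_cells get_nearby_cells
  apply PySem.List.sorted_eq_of_perm_of_pairwise_lt _ _ _ ?_ (pv_pairwise_alt board dist)
  rw [List.perm_ext_iff_of_nodup (pv_nodup_alt board dist)
      (pv_nodup_foldl _ (fun s r hs => pv_nodup_foldl _ (fun s c hs =>
        (by
          split_ifs with h1
          · exact pv_nodup_foldl _ (fun s dr hs => pv_nodup_foldl _ (fun s dc hs =>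
              (by split_ifs with h2 h3
                  · exact hs
                  · exact PySem.Set.nodup_add _ _ hs
                  · exact hs)) _ _ hs) _ _ hs
          · exact hs)) _ _ hs) _ _ (by simp [PySem.Set.empty]))]
  intro y
  rw [pv_mem_alt, ← pv_P_iff_Q]
  rw [pv_mem_foldl_iff _ _ (fun s r y => pv_mem_cloop board (PySem.List.len board)
      (PySem.List.len (PySem.List.pyGetD board 0 [])) dist r s y)]
  unfold pvP
  simp only [PySem.List.mem_pyRange_one, PySem.Set.empty, List.not_mem_nil, false_or]
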